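-- pv_equiv track=rewrite | github.com/groovewaves-prog/ver2_Premonition_detection-demo | digital_twin_pkg/common.py | get_all_downstream
-- ===== SOURCE A (Python) =====
-- from typing import Any, Dict, List, Optional, Set, Tuple
--
-- def get_node_attr(node: Any, attr: str, default: Any = None) -> Any:
--     """dict/object 両対応でノード属性を取得"""
--     if isinstance(node, dict):
--         return node.get(attr, default)
--     return getattr(node, attr, default)
--
-- def build_children_map(topology: dict) -> Dict[str, List[str]]:
--     """トポロジーから parent→children のマッピングを構築"""
--     children: Dict[str, List[str]] = {}
--     for dev_id, node in topology.items():
--         pid = get_node_attr(node, 'parent_id')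
--         if pid:
--             children.setdefault(pid, []).append(dev_id)
--     return children
--
-- def get_redundancy_group(topology: dict, node_id: str) -> Optional[str]:
--     """ノードが属する冗長グループを取得"""
--     node = topology.get(node_id)
--     if not node:
--         return None
--     return get_node_attr(node, 'redundancy_group')
--
-- def get_downstream_devices(
--     topology: dict,
--     root_id: str,
--     max_hops: int = 0,
--     include_hop_distance: bool = False,
--     consider_redundancy: bool = False,
--     children_map: Optional[Dict[str, List[str]]] = None,
-- ) -> list:
--     """
--     BFS で root_id の配下デバイスを取得する統合関数。
--
--     Args:
--         topology: トポロジー辞書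
--         root_id: 起点デバイスID
--         max_hops: 最大ホップ数 (0=無制限)
--         include_hop_distance: True → List[Tuple[str, int]], False → List[str]
--         consider_redundancy: True → 冗長グループメンバーの配下も含める
--         children_map: 事前構築済み children_map (省略時は内部で構築)
--
--     Returns:
--         include_hop_distance=True:  [(device_id, hop_distance), ...]
--         include_hop_distance=False: [device_id, ...]
--     """
--     if children_map is None:
--         children_map = build_children_map(topology)
--
--     # 冗長グループ考慮: root_id と同一 RG のメンバーも起点に含める
--     start_ids = {root_id}
--     if consider_redundancy:
--         root_rg = get_redundancy_group(topology, root_id)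
--         if root_rg:
--             for dev_id in topology:
--                 if get_redundancy_group(topology, dev_id) == root_rg:
--                     start_ids.add(dev_id)
--
--     results: list = []
--     visited: Set[str] = set(start_ids)
--     # (current_id, hop_distance)
--     queue: List[Tuple[str, int]] = [(sid, 0) for sid in start_ids]
--
--     while queue:
--         current, hop = queue.pop(0)
--         if current not in start_ids:
--             if include_hop_distance:
--                 results.append((current, hop))
--             else:
--                 results.append(current)
--         next_hop = hop + 1
--         if max_hops > 0 and next_hop > max_hops:
--             continue
--         for child in children_map.get(current, []):
--             if child not in visited:
--                 visited.add(child)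
--                 queue.append((child, next_hop))
--
--     return results
--
-- def get_all_downstream(
--     topology: dict,
--     root_ids: List[str],
--     consider_redundancy: bool = True,
-- ) -> List[str]:
--     """
--     複数起点のBFS配下デバイスリスト（冗長グループ考慮対応）。
--     alarm_generator から呼ばれる。
--     """
--     children_map = build_children_map(topology)
--     all_downstream: Set[str] = set()
--     for rid in root_ids:
--         devs = get_downstream_devices(
--             topology, rid,
--             consider_redundancy=consider_redundancy,
--             children_map=children_map,
--         )
--         all_downstream.update(devs)
--     return list(all_downstream)
-- ===== SOURCE B (Python) =====
-- def get_all_downstream(topology, root_ids, consider_redundancy=True):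
--     # Different algorithm: no parent->children map and no BFS queue.  One pass
--     # over topology collects the (parent, child) edge list plus a
--     # redundancy_group -> members index; each root's start set is saturated by
--     # whole passes over the edge list until a pass adds nothing (transitive
--     # closure as a least fixpoint); the closure minus the start set is that
--     # root's downstream.  The union is returned sorted (A returns list(set),
--     # whose order is unspecified; as a set the value is identical).
--     edges = []
--     rg_index = {}
--     for dev_id, node in topology.items():
--         pid = node.get('parent_id')
--         if pid:
--             edges.append((pid, dev_id))
--         rg = node.get('redundancy_group') if node else None
--         if rg:
--             rg_index.setdefault(rg, []).append(dev_id)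
--     all_downstream = set()
--     for rid in root_ids:
--         starts = {rid}
--         if consider_redundancy:
--             node = topology.get(rid)
--             rg = node.get('redundancy_group') if node else None
--             if rg:
--                 starts.update(rg_index.get(rg, []))
--         closure = set(starts)
--         changed = True
--         while changed:
--             changed = False
--             for p, c in edges:
--                 if p in closure and c not in closure:
--                     closure.add(c)
--                     changed = True
--         all_downstream |= closure - starts
--     return sorted(all_downstream)
-- ===== Notes on version B (the rewrite author's own statement) =====
-- stated objective: alternative
-- what changed: B drops the parent->children map and the BFS queue entirely: one pass over topology collects a (parent, child) edge list and a redundancy_group->members index, each root's start set is saturated by repeated whole passes over the edge list until a fixpoint (transitive closure by edge relaxation), and the union of the closures minus their start sets is returned sorted (A returns list(set), whose order is unspecified; the value is the same set).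
import Mathlib
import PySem

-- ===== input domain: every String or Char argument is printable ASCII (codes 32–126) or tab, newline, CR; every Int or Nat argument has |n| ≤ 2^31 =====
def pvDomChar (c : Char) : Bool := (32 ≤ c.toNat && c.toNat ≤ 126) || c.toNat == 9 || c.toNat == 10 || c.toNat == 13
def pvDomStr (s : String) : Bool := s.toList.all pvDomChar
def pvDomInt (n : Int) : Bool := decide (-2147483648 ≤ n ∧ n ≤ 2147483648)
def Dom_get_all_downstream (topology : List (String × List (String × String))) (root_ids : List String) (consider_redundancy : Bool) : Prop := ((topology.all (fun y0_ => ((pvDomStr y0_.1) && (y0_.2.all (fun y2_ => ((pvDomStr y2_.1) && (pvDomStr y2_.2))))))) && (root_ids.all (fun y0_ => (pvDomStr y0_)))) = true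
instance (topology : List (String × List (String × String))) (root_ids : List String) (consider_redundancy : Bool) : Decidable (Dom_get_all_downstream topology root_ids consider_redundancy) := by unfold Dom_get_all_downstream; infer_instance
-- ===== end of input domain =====

-- B replaces A's children-map + per-root redundancy rescan + BFS queue by an edge
-- list + rg->members index built in one pass, saturated per root by fixpoint
-- relaxation passes (objective: alternative).  Both Pythons return the same SET;
-- A's list(set) order is unspecified (the result is compared as a set), so both
-- ports return the set's sorted enumeration (the order-free reading of list(s)).

-- ===== PORT A =====

-- get_node_attr(node, attr): every node here is a dict, so this is node.get(attr) (default None)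
def pvNodeGet (node : List (String × String)) (attr : String) : Option String :=
  (PySem.Dict.mk node).get? attr

-- loop body of build_children_map: children.setdefault(pid, []).append(dev_id) if pid truthy
def pvStepC (children : PySem.Dict String (List String))
    (p : String × List (String × String)) : PySem.Dict String (List String) :=
  match pvNodeGet p.2 "parent_id" with
  | some pid => if pid ≠ "" then children.modify pid [] (· ++ [p.1]) else children
  | none => children

def pvBuildChildrenMap (topology : List (String × List (String × String))) :
    PySem.Dict String (List String) :=
  topology.foldl pvStepC PySem.Dict.empty

-- get_redundancy_group: topology.get(node_id); 'if not node' is the empty-dict test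
def pvGetRG (topology : List (String × List (String × String))) (node_id : String) :
    Option String :=
  match (PySem.Dict.mk topology).get? node_id with
  | none => none
  | some node => if node = [] then none else pvNodeGet node "redundancy_group"

-- body of 'for dev_id in topology: if get_redundancy_group(...) == root_rg: start_ids.add(dev_id)'
def pvStartStep (topology : List (String × List (String × String))) (root_rg : String)
    (st : PySem.Set String) (p : String × List (String × String)) : PySem.Set String :=
  if pvGetRG topology p.1 = some root_rg then PySem.Set.add st p.1 else st

-- body of 'for child in children_map.get(current, []): if child not in visited: …'
def pvChildStepA (next_hop : Int) (qv : List (String × Int) × PySem.Set String)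
    (child : String) : List (String × Int) × PySem.Set String :=
  if ¬ (PySem.Set.contains qv.2 child) then
    (qv.1 ++ [(child, next_hop)], PySem.Set.add qv.2 child)
  else qv

-- the while-queue loop of get_downstream_devices (include_hop_distance=False: the entry
-- always calls it so; the tuple-returning branch is untypeable here and never taken).
-- The 'while queue' loop runs on fuel; the caller passes fuel that is never exhausted
-- (each iteration pops one element; total pushes ≤ |start| + total children-list length).
def pvBFS_A (children_map : PySem.Dict String (List String)) (start_ids : PySem.Set String)
    (max_hops : Int) :
    Nat → List (String × Int) → PySem.Set String → List String → List String
  | 0, _, _, results => results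
  | _ + 1, [], _, results => results
  | fuel + 1, (current, hop) :: queue, visited, results =>
      let results := if ¬ (PySem.Set.contains start_ids current) then results ++ [current]
                     else results
      let next_hop := hop + 1
      if max_hops > 0 ∧ next_hop > max_hops then
        pvBFS_A children_map start_ids max_hops fuel queue visited results
      else
        let qv := (children_map.getD current []).foldl (pvChildStepA next_hop) (queue, visited)
        pvBFS_A children_map start_ids max_hops fuel qv.1 qv.2 results

-- get_downstream_devices(topology, root_id, consider_redundancy=…, children_map=…)
def pvGetDownstream (topology : List (String × List (String × String))) (root_id : String)
    (max_hops : Int) (consider_redundancy : Bool)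
    (children_map : PySem.Dict String (List String)) : List String :=
  let start_ids : PySem.Set String := PySem.Set.ofList [root_id]
  let start_ids :=
    if consider_redundancy then
      match pvGetRG topology root_id with
      | some root_rg =>
          if root_rg ≠ "" then topology.foldl (pvStartStep topology root_rg) start_ids
          else start_ids
      | none => start_ids
    else start_ids
  let visited : PySem.Set String := PySem.Set.ofList start_ids
  let queue : List (String × Int) := start_ids.map (fun sid => (sid, (0 : Int)))
  let fuel := queue.length + ((children_map.values.map List.length).sum) + 1
  pvBFS_A children_map start_ids max_hops fuel queue visited []

-- return list(all_downstream): the caller compares the result as a SET (its order is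
-- CPython hash order, unspecified), so list(s) is ported order-free as the set's
-- sorted enumeration (PySem: consume a Set only where order cannot matter).
def get_all_downstream (topology : List (String × List (String × String)))
    (root_ids : List String) (consider_redundancy : Bool) : List String :=
  let children_map := pvBuildChildrenMap topology
  let all_downstream : PySem.Set String :=
    root_ids.foldl (fun all_downstream rid =>
        PySem.Set.update all_downstream
          (pvGetDownstream topology rid 0 consider_redundancy children_map))
      PySem.Set.empty
  PySem.List.sorted all_downstream (fun x => x) false

-- ===== PORT B =====

-- 'rg = node.get("redundancy_group") if node else None'
def pvNodeRG (node : List (String × String)) : Option String :=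
  if node = [] then none else (PySem.Dict.mk node).get? "redundancy_group"

-- loop body of B's single pass: (parent, child) edge list and rg -> members index together
def pvStepEI (ei : List (String × String) × PySem.Dict String (List String))
    (p : String × List (String × String)) :
    List (String × String) × PySem.Dict String (List String) :=
  let edges :=
    match (PySem.Dict.mk p.2).get? "parent_id" with
    | some pid => if pid ≠ "" then ei.1 ++ [(pid, p.1)] else ei.1
    | none => ei.1
  let rg_index :=
    match pvNodeRG p.2 with
    | some g => if g ≠ "" then ei.2.modify g [] (· ++ [p.1]) else ei.2
    | none => ei.2
  (edges, rg_index)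

def pvEdgesIndexB (topology : List (String × List (String × String))) :
    List (String × String) × PySem.Dict String (List String) :=
  topology.foldl pvStepEI ([], PySem.Dict.empty)

-- body of 'for p, c in edges: if p in closure and c not in closure: closure.add(c); changed = True'
def pvRelax (s : PySem.Set String × Bool) (e : String × String) : PySem.Set String × Bool :=
  if PySem.Set.contains s.1 e.1 ∧ ¬ (PySem.Set.contains s.1 e.2) then
    (PySem.Set.add s.1 e.2, true)
  else s

-- 'while changed:' — one relaxation pass per iteration, run on fuel; a changing pass
-- adds at least one child to the closure, so |topology|+1 passes always reach the
-- fixpoint (proved below): the fuel is never exhausted.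
def pvSaturate (edges : List (String × String)) :
    Nat → PySem.Set String → PySem.Set String
  | 0, cl => cl
  | fuel + 1, cl =>
      let r := edges.foldl pvRelax (cl, false)
      if r.2 then pvSaturate edges fuel r.1 else r.1

-- start ids for one root: {rid} plus the indexed members of rid's redundancy group
def pvStartsB (topology : List (String × List (String × String)))
    (rg_index : PySem.Dict String (List String)) (rid : String)
    (consider_redundancy : Bool) : List String :=
  if consider_redundancy then
    match (match (PySem.Dict.mk topology).get? rid with
           | none => none
           | some node => pvNodeRG node) with
    | some rg => if rg ≠ "" then [rid] ++ (rg_index.getD rg []) else [rid]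
    | none => [rid]
  else [rid]

def get_all_downstream_alt (topology : List (String × List (String × String)))
    (root_ids : List String) (consider_redundancy : Bool) : List String :=
  let ei := pvEdgesIndexB topology
  let all_downstream : PySem.Set String :=
    root_ids.foldl (fun all_downstream rid =>
        let starts : PySem.Set String :=
          PySem.Set.ofList (pvStartsB topology ei.2 rid consider_redundancy)
        let closure := pvSaturate ei.1 (topology.length + 1) (PySem.Set.ofList starts)
        PySem.Set.update all_downstream (PySem.Set.diff closure starts))
      PySem.Set.empty
  PySem.List.sorted all_downstream (fun x => x) false

-- ===== PRECONDITION & SPEC =====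
-- Pre_ excludes only association lists with a repeated topology key: a Python dict cannot
-- have duplicate keys, so no Python input is excluded (A looks nodes up by key where B
-- reads each entry's own node; only duplicate keys could tell them apart).
def Pre_get_all_downstream (topology : List (String × List (String × String))) (root_ids : List String) (consider_redundancy : Bool) : Prop :=
  (topology.map Prod.fst).Nodup
instance (topology : List (String × List (String × String))) (root_ids : List String) (consider_redundancy : Bool) : Decidable (Pre_get_all_downstream topology root_ids consider_redundancy) := by unfold Pre_get_all_downstream; infer_instance

def pvWitness_get_all_downstream : (List (String × List (String × String))) × List String × Bool :=
  ([("a", [("parent_id", ""), ("redundancy_group", "g")]),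
    ("b", [("parent_id", "a"), ("redundancy_group", "g")]),
    ("c", [("parent_id", "b")])], ["a"], true)

def Spec_get_all_downstream (topology : List (String × List (String × String))) (root_ids : List String) (consider_redundancy : Bool) (out : List String) : Prop := out = get_all_downstream_alt topology root_ids consider_redundancy
instance (topology : List (String × List (String × String))) (root_ids : List String) (consider_redundancy : Bool) (out : List String) : Decidable (Spec_get_all_downstream topology root_ids consider_redundancy out) := by unfold Spec_get_all_downstream; infer_instance

-- ===== CLAIM (what is proved, stated in full; the proofs are below) =====
def Claim_equal_get_all_downstream : Prop := ∀ (topology : List (String × List (String × String))) (root_ids : List String) (consider_redundancy : Bool), Dom_get_all_downstream topology root_ids consider_redundancy → Pre_get_all_downstream topology root_ids consider_redundancy → Spec_get_all_downstream topology root_ids consider_redundancy (get_all_downstream topology root_ids consider_redundancy)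

-- ===== LEMMAS AND PROOFS =====

-- the (truthy) parent of a node, and the edge relation both programs traverse
def pvParent (node : List (String × String)) : Option String :=
  match (PySem.Dict.mk node).get? "parent_id" with
  | some pid => if pid ≠ "" then some pid else none
  | none => none

def pvEdge (topology : List (String × List (String × String))) (p c : String) : Prop :=
  ∃ node, (c, node) ∈ topology ∧ pvParent node = some p

-- reachability from a list of roots along an edge relation
inductive pvRch (E : String → String → Prop) (R : List String) : String → Prop
  | base (x : String) : x ∈ R → pvRch E R x
  | step (p c : String) : pvRch E R p → E p c → pvRch E R c

theorem pvRch_nil {E : String → String → Prop} {x : String} (h : pvRch E [] x) : False := by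
  induction h with
  | base x hx => simp at hx
  | step p c _ _ ih => exact ih

theorem pvRch_congr {E E' : String → String → Prop} {R : List String} {x : String}
    (hE : ∀ p c, E p c ↔ E' p c) (h : pvRch E R x) : pvRch E' R x := by
  induction h with
  | base x hx => exact pvRch.base x hx
  | step p c _ he ih => exact pvRch.step p c ih ((hE p c).mp he)

theorem pvRch_mono {E : String → String → Prop} {R R' : List String} {x : String}
    (hR : ∀ y, y ∈ R → y ∈ R') (h : pvRch E R x) : pvRch E R' x := by
  induction h with
  | base x hx => exact pvRch.base x (hR x hx)
  | step p c _ he ih => exact pvRch.step p c ih he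

-- ---- characterization of A's children map and B's edge list ----

theorem pv_foldC_getD (l : List (String × List (String × String)))
    (d : PySem.Dict String (List String)) (p : String) :
    (l.foldl pvStepC d).getD p []
      = d.getD p [] ++ (l.filter (fun e => decide (pvParent e.2 = some p))).map Prod.fst := by
  induction l generalizing d with
  | nil => simp
  | cons e l ih =>
      simp only [List.foldl_cons, List.filter_cons]
      rcases hp : pvParent e.2 with _ | pid
      · have h1 : pvStepC d e = d := by
          unfold pvStepC pvParent at *
          rcases h : pvNodeGet e.2 "parent_id" with _ | s
          · rfl
          · simp only [pvNodeGet] at h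
            rw [h] at hp
            by_cases hs : s = ""
            · simp [hs]
            · simp [hs] at hp
        rw [h1, ih]
        simp [hp]
      · have hpid : pid ≠ "" := by
          unfold pvParent at hp
          rcases h : pvNodeGet e.2 "parent_id" with _ | s
          · simp only [pvNodeGet] at h; rw [h] at hp; simp at hp
          · simp only [pvNodeGet] at h; rw [h] at hp
            by_cases hs : s = "" <;> simp [hs] at hp
            subst hp; exact hs
        have h1 : pvStepC d e = d.modify pid [] (· ++ [e.1]) := by
          unfold pvStepC
          rcases h : pvNodeGet e.2 "parent_id" with _ | s
          · unfold pvParent at hp; simp only [pvNodeGet] at h; rw [h] at hp; simp at hp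
          · unfold pvParent at hp; simp only [pvNodeGet] at h; rw [h] at hp
            by_cases hs : s = ""
            · simp [hs] at hp
            · simp [hs] at hp; rw [hp]; simp [hpid]
        rw [h1, ih]
        by_cases hpp : pid = p
        · subst hpp
          simp [PySem.Dict.getD_modify_self, hp]
        · rw [PySem.Dict.getD_modify_of_ne _ _ _ (fun hh => hpp hh.symm)]
          simp [hp, hpp]

theorem pv_memC (topology : List (String × List (String × String))) (p c : String) :
    c ∈ (pvBuildChildrenMap topology).getD p [] ↔ pvEdge topology p c := by
  unfold pvBuildChildrenMap
  rw [pv_foldC_getD]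
  simp only [PySem.Dict.getD_empty, List.nil_append, List.mem_map, List.mem_filter]
  constructor
  · rintro ⟨e, ⟨he, hpe⟩, rfl⟩
    exact ⟨e.2, he, by simpa using hpe⟩
  · rintro ⟨node, hn, hp⟩
    exact ⟨(c, node), ⟨hn, by simpa using hp⟩, rfl⟩

theorem pv_kids_nodup (topology : List (String × List (String × String)))
    (hnd : (topology.map Prod.fst).Nodup) (p : String) :
    ((pvBuildChildrenMap topology).getD p []).Nodup := by
  unfold pvBuildChildrenMap
  rw [pv_foldC_getD]
  simp only [PySem.Dict.getD_empty, List.nil_append]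
  have hsub : List.Sublist
      ((topology.filter (fun e => decide (pvParent e.2 = some p))).map Prod.fst)
      (topology.map Prod.fst) := List.Sublist.map _ List.filter_sublist
  exact hsub.nodup hnd

theorem pv_edgesB (topology : List (String × List (String × String))) :
    (pvEdgesIndexB topology).1
      = topology.filterMap (fun e => (pvParent e.2).map (fun pid => (pid, e.1))) := by
  unfold pvEdgesIndexB
  suffices h : ∀ (es : List (String × String)) (i : PySem.Dict String (List String)),
      (topology.foldl pvStepEI (es, i)).1
        = es ++ topology.filterMap (fun e => (pvParent e.2).map (fun pid => (pid, e.1))) by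
    simpa using h [] PySem.Dict.empty
  induction topology with
  | nil => intro es i; simp
  | cons e l ih =>
      intro es i
      simp only [List.foldl_cons, List.filterMap_cons]
      have hstep : pvStepEI (es, i) e
          = (es ++ (match pvParent e.2 with
                    | some pid => [(pid, e.1)]
                    | none => []), (pvStepEI (es, i) e).2) := by
        unfold pvStepEI pvParent
        rcases h : (PySem.Dict.mk e.2).get? "parent_id" with _ | s
        · simp
        · by_cases hs : s = "" <;> simp [hs]
      rw [hstep, ih]
      rcases hp : pvParent e.2 with _ | pid <;> simp [hp]

theorem pv_memE (topology : List (String × List (String × String))) (p c : String) :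
    (p, c) ∈ (pvEdgesIndexB topology).1 ↔ pvEdge topology p c := by
  rw [pv_edgesB]
  simp only [List.mem_filterMap, Option.map_eq_some_iff]
  constructor
  · rintro ⟨e, he, pid, hpid, heq⟩
    cases heq
    exact ⟨e.2, he, hpid⟩
  · rintro ⟨node, hn, hp⟩
    exact ⟨(c, node), hn, p, hp, rfl⟩

-- ---- start sets: A's redundancy rescan = B's indexed lookup (unique keys) ----

theorem pv_fold_snd_getD (g : String) (hg : g ≠ "")
    (l : List (String × List (String × String)))
    (es : List (String × String)) (i : PySem.Dict String (List String)) :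
    ((l.foldl pvStepEI (es, i)).2).getD g []
      = i.getD g [] ++ (l.filter (fun p => decide (pvNodeRG p.2 = some g))).map Prod.fst := by
  induction l generalizing es i with
  | nil => simp
  | cons p l ih =>
      simp only [List.foldl_cons, List.filter_cons]
      have hfold : (List.foldl pvStepEI (pvStepEI (es, i) p) l).2.getD g []
          = ((pvStepEI (es, i) p).2).getD g []
            ++ (l.filter (fun p => decide (pvNodeRG p.2 = some g))).map Prod.fst := by
        have h := ih (pvStepEI (es, i) p).1 (pvStepEI (es, i) p).2
        simpa using h
      rw [hfold]
      rcases hrg : pvNodeRG p.2 with _ | g'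
      · have h2 : (pvStepEI (es, i) p).2 = i := by simp [pvStepEI, hrg]
        rw [h2]
        simp [hrg]
      · by_cases hgg : g' = g
        · subst hgg
          have h2 : (pvStepEI (es, i) p).2 = i.modify g' [] (· ++ [p.1]) := by
            simp [pvStepEI, hrg, hg]
          rw [h2, PySem.Dict.getD_modify_self]
          simp [hrg, hg]
        · by_cases hne : g' = ""
          · have h2 : (pvStepEI (es, i) p).2 = i := by simp [pvStepEI, hrg, hne]
            rw [h2]
            simp [hrg, hgg]
          · have h2 : (pvStepEI (es, i) p).2 = i.modify g' [] (· ++ [p.1]) := by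
              simp [pvStepEI, hrg, hne]
            rw [h2, PySem.Dict.getD_modify_of_ne _ _ _ (Ne.symm hgg)]
            simp [hrg, hgg]

theorem pv_getRG_mem (topology : List (String × List (String × String)))
    (hnd : (topology.map Prod.fst).Nodup)
    (p : String × List (String × String)) (hp : p ∈ topology) :
    pvGetRG topology p.1 = pvNodeRG p.2 := by
  have hget : (PySem.Dict.mk topology).get? p.1 = some p.2 := by
    apply PySem.Dict.get?_of_mem_items
    · exact hp
    · simpa [PySem.Dict.keys] using hnd
  simp [pvGetRG, hget, pvNodeRG, pvNodeGet]

theorem pv_start_fold (topology : List (String × List (String × String))) (rg : String)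
    (l : List (String × List (String × String))) (s : PySem.Set String) :
    l.foldl (pvStartStep topology rg) s
      = PySem.Set.update s
          ((l.filter (fun p => decide (pvGetRG topology p.1 = some rg))).map Prod.fst) := by
  induction l generalizing s with
  | nil => simp [PySem.Set.update]
  | cons p l ih =>
      simp only [List.foldl_cons, List.filter_cons]
      by_cases hc : pvGetRG topology p.1 = some rg
      · rw [show pvStartStep topology rg s p = PySem.Set.add s p.1 from if_pos hc, ih]
        simp [hc, PySem.Set.update_cons]
      · rw [show pvStartStep topology rg s p = s from if_neg hc, ih]
        simp [hc]

theorem pv_starts (topology : List (String × List (String × String)))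
    (hnd : (topology.map Prod.fst).Nodup) (rid : String) (cr : Bool) :
    (if cr then
      match pvGetRG topology rid with
      | some root_rg =>
          if root_rg ≠ "" then
            topology.foldl (pvStartStep topology root_rg) (PySem.Set.ofList [rid])
          else PySem.Set.ofList [rid]
      | none => PySem.Set.ofList [rid]
     else PySem.Set.ofList [rid])
      = PySem.Set.ofList (pvStartsB topology (pvEdgesIndexB topology).2 rid cr) := by
  have hlk : (match (PySem.Dict.mk topology).get? rid with
              | none => none
              | some node => pvNodeRG node) = pvGetRG topology rid := by
    rcases hget : (PySem.Dict.mk topology).get? rid with _ | node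
    · simp [pvGetRG, hget]
    · simp [pvGetRG, hget, pvNodeRG, pvNodeGet]
  rcases cr with _ | _
  · simp [pvStartsB]
  · simp only [if_pos trivial, pvStartsB, hlk]
    rcases hrg : pvGetRG topology rid with _ | rg
    · rfl
    · by_cases hne : rg = ""
      · simp [hne]
      · simp only [hne, ne_eq, not_false_eq_true, if_pos]
        rw [pv_start_fold]
        have hfilter : topology.filter (fun p => decide (pvGetRG topology p.1 = some rg))
            = topology.filter (fun p => decide (pvNodeRG p.2 = some rg)) := by
          apply List.filter_congr
          intro p hp
          rw [pv_getRG_mem topology hnd p hp]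
        have hidx : ((pvEdgesIndexB topology).2).getD rg []
            = (topology.filter (fun p => decide (pvNodeRG p.2 = some rg))).map Prod.fst := by
          have := pv_fold_snd_getD rg hne topology [] PySem.Dict.empty
          simpa [pvEdgesIndexB, PySem.Dict.getD_empty] using this
        rw [hfilter, hidx, PySem.Set.ofList_append]

-- ---- a counting helper for both termination arguments ----

theorem pv_countP_split (l : List String) (p q : String → Bool)
    (h : ∀ x, q x = true → p x = true) :
    l.countP p = l.countP q + l.countP (fun x => p x && !(q x)) := by
  induction l with
  | nil => simp
  | cons a l ih =>
      simp only [List.countP_cons]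
      by_cases hq : q a = true
      · simp [hq, h a hq]; omega
      · by_cases hp : p a = true <;> simp [hp, hq] <;> omega

theorem pv_countP_drop (l : List String) (v v' : List String)
    (hsub : ∀ x, x ∈ v → x ∈ v') (new : List String) (hN : new.Nodup)
    (hnew : ∀ x, x ∈ new → x ∈ l ∧ x ∉ v ∧ x ∈ v') :
    l.countP (fun x => !(PySem.Set.contains v' x)) + new.length
      ≤ l.countP (fun x => !(PySem.Set.contains v x)) := by
  have hsplit := pv_countP_split l (fun x => !(PySem.Set.contains v x))
      (fun x => !(PySem.Set.contains v' x))
      (by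
        intro x hx
        simp only [Bool.not_eq_eq_eq_not, Bool.not_true] at hx ⊢
        rcases h : PySem.Set.contains v x with _ | _
        · rfl
        · exact absurd ((PySem.Set.contains_iff v x).mp h)
            (fun hm => by
              have := hsub x hm
              rw [(PySem.Set.contains_iff v' x).mpr this] at hx
              simp at hx))
  simp only [Bool.not_not] at hsplit
  rw [hsplit]
  have hle : new.length
      ≤ l.countP (fun x => !(PySem.Set.contains v x) && PySem.Set.contains v' x) := by
    rw [List.countP_eq_length_filter]
    apply List.Subperm.length_le
    apply hN.subperm
    intro x hx
    rcases hnew x hx with ⟨hl, hnv, hv'⟩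
    rw [List.mem_filter]
    refine ⟨hl, ?_⟩
    have h1 : PySem.Set.contains v x = false := by
      rcases h : PySem.Set.contains v x with _ | _
      · rfl
      · exact absurd ((PySem.Set.contains_iff v x).mp h) hnv
    have h2 : PySem.Set.contains v' x = true := (PySem.Set.contains_iff v' x).mpr hv'
    simp only [Bool.and_eq_true, Bool.not_eq_eq_eq_not, Bool.not_true]
    exact ⟨h1, h2⟩
  omega

-- ---- A's BFS loop: its result lists exactly the reachable non-start nodes ----

theorem pv_childfold (kids : List String) (hk : kids.Nodup) (h : Int)
    (q : List (String × Int)) (v : PySem.Set String) :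
    kids.foldl (pvChildStepA h) (q, v)
      = (q ++ (kids.filter (fun c => !(PySem.Set.contains v c))).map (fun c => (c, h)),
         v ++ kids.filter (fun c => !(PySem.Set.contains v c))) := by
  induction kids generalizing q v with
  | nil => simp
  | cons k kids ih =>
      have hkN : kids.Nodup := hk.of_cons
      have hknotin : k ∉ kids := by
        intro hm; exact (List.nodup_cons.mp hk).1 hm
      simp only [List.foldl_cons, List.filter_cons]
      by_cases hc : PySem.Set.contains v k = true
      · have hkv : k ∈ v := (PySem.Set.contains_iff v k).mp hc
        have h1 : pvChildStepA h (q, v) k = (q, v) := by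
          simp [pvChildStepA, hkv]
        rw [h1, ih hkN]
        simp [hkv, hc]
      · have hnm : k ∉ v := fun hm => hc ((PySem.Set.contains_iff v k).mpr hm)
        have h1 : pvChildStepA h (q, v) k
            = (q ++ [(k, h)], PySem.Set.add v k) := by
          simp [pvChildStepA, hnm]
        rw [h1, ih hkN, PySem.Set.add_of_not_mem hnm]
        have hfcong : kids.filter (fun c => !(PySem.Set.contains (v ++ [k]) c))
            = kids.filter (fun c => !(PySem.Set.contains v c)) := by
          apply List.filter_congr
          intro c hcm
          have hck : c ≠ k := fun hh => hknotin (hh ▸ hcm)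
          have : (PySem.Set.contains (v ++ [k]) c) = (PySem.Set.contains v c) := by
            rcases hcv : PySem.Set.contains v c with _ | _
            · rcases hcv2 : PySem.Set.contains (v ++ [k]) c with _ | _
              · rfl
              · have := (PySem.Set.contains_iff _ c).mp hcv2
                simp only [List.mem_append, List.mem_singleton] at this
                rcases this with h' | h'
                · rw [(PySem.Set.contains_iff v c).mpr h'] at hcv; simp at hcv
                · exact absurd h' hck
            · have := (PySem.Set.contains_iff v c).mp hcv
              rw [(PySem.Set.contains_iff _ c).mpr (by simp [this])]
          rw [this]
        rw [hfcong]
        simp [hnm]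

theorem pv_getD_flatten (d : PySem.Dict String (List String)) (p x : String)
    (hx : x ∈ d.getD p []) : x ∈ d.values.flatten := by
  rcases hg : d.get? p with _ | l
  · rw [PySem.Dict.getD_eq_get?_getD, hg] at hx
    simp at hx
  · rw [PySem.Dict.getD_eq_get?_getD, hg] at hx
    have hmem : (p, l) ∈ d.items := PySem.Dict.mem_items_of_get?_eq_some d hg
    have hlv : l ∈ d.values := by
      have : l = (p, l).2 := rfl
      rw [this]
      exact List.mem_map_of_mem hmem
    exact List.mem_flatten.mpr ⟨l, hlv, hx⟩

-- forward half of the queue-step equivalence: reach from the new frontier implies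
-- reach from the old one
theorem pv_rch_back (C : PySem.Dict String (List String)) (v : PySem.Set String)
    (cur : String) (restfst : List String) (x : String)
    (hx : pvRch (fun p c => c ∈ C.getD p []) (restfst
            ++ (C.getD cur []).filter (fun c => !(PySem.Set.contains v c))) x) :
    pvRch (fun p c => c ∈ C.getD p []) (cur :: restfst) x := by
  induction hx with
  | base y hy =>
      rcases List.mem_append.mp hy with h | h
      · exact pvRch.base y (List.mem_cons_of_mem _ h)
      · exact pvRch.step cur y (pvRch.base cur List.mem_cons_self)
          (List.mem_of_mem_filter h)
  | step p c hp he ih => exact pvRch.step p c ih he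

-- backward half: reach from the old frontier lands in cur, the new frontier's
-- reach, or an already-expanded visited node
theorem pv_rch_fwd (C : PySem.Dict String (List String)) (v : PySem.Set String)
    (cur : String) (restfst : List String)
    (hclosed : ∀ x, x ∈ v → x ∉ cur :: restfst → ∀ c, c ∈ C.getD x [] → c ∈ v)
    (x : String)
    (hx : pvRch (fun p c => c ∈ C.getD p []) (cur :: restfst) x) :
    let new := (C.getD cur []).filter (fun c => !(PySem.Set.contains v c))
    x = cur ∨ pvRch (fun p c => c ∈ C.getD p []) (restfst ++ new) x
      ∨ (x ∈ v ∧ x ∉ restfst ∧ x ∉ new) := by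
  intro new
  induction hx with
  | base y hy =>
      rcases List.mem_cons.mp hy with h | h
      · exact Or.inl h
      · exact Or.inr (Or.inl (pvRch.base y (List.mem_append_left _ h)))
  | step p c hp he ih =>
      have hchild : ∀ c', c' ∈ C.getD cur [] →
          c' = cur ∨ pvRch (fun p c => c ∈ C.getD p []) (restfst ++ new) c'
            ∨ (c' ∈ v ∧ c' ∉ restfst ∧ c' ∉ new) := by
        intro c' hc'
        by_cases hcv : c' ∈ v
        · by_cases hcc : c' = cur
          · exact Or.inl hcc
          · by_cases hcr : c' ∈ restfst
            · exact Or.inr (Or.inl (pvRch.base c' (List.mem_append_left _ hcr)))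
            · refine Or.inr (Or.inr ⟨hcv, hcr, ?_⟩)
              intro hcn
              have := (List.mem_filter.mp hcn).2
              rw [(PySem.Set.contains_iff v c').mpr hcv] at this
              simp at this
        · have hcn : c' ∈ new := by
            rw [List.mem_filter]
            refine ⟨hc', ?_⟩
            have : PySem.Set.contains v c' = false := by
              rcases hcb : PySem.Set.contains v c' with _ | _
              · rfl
              · exact absurd ((PySem.Set.contains_iff v c').mp hcb) hcv
            simp [this, hcv]
          exact Or.inr (Or.inl (pvRch.base c' (List.mem_append_right _ hcn)))
      rcases ih with hpc | hpr | ⟨hpv, hpr, hpn⟩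
      · subst hpc
        exact hchild c he
      · exact Or.inr (Or.inl (pvRch.step p c hpr he))
      · by_cases hpcur : p = cur
        · subst hpcur
          exact hchild c he
        · have hcv : c ∈ v := hclosed p hpv
            (by
              intro hm
              rcases List.mem_cons.mp hm with h | h
              · exact hpcur h
              · exact hpr h) c he
          by_cases hcc : c = cur
          · exact Or.inl hcc
          · by_cases hcr : c ∈ restfst
            · exact Or.inr (Or.inl (pvRch.base c (List.mem_append_left _ hcr)))
            · refine Or.inr (Or.inr ⟨hcv, hcr, ?_⟩)
              intro hcn
              have := (List.mem_filter.mp hcn).2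
              rw [(PySem.Set.contains_iff v c).mpr hcv] at this
              simp at this

theorem pv_bfs_spec (C : PySem.Dict String (List String)) (S : PySem.Set String)
    (hkN : ∀ p, (C.getD p []).Nodup)
    (fuel : Nat) (q : List (String × Int)) (v : PySem.Set String) (res : List String)
    (hfuel : q.length + (C.values.flatten.countP (fun c => !(PySem.Set.contains v c))) + 1 ≤ fuel)
    (hv : ∀ x, x ∈ v ↔ x ∈ S ∨ x ∈ res ∨ x ∈ q.map Prod.fst)
    (hvN : v.Nodup) (hresN : res.Nodup) (hqN : (q.map Prod.fst).Nodup)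
    (hrS : ∀ x, x ∈ res → x ∉ S) (hrQ : ∀ x, x ∈ res → x ∉ q.map Prod.fst)
    (hclosed : ∀ x, x ∈ v → x ∉ q.map Prod.fst → ∀ c, c ∈ C.getD x [] → c ∈ v) :
    (pvBFS_A C S 0 fuel q v res).Nodup ∧
    ∀ x, x ∈ pvBFS_A C S 0 fuel q v res ↔
      (x ∈ res ∨ (x ∉ S ∧ pvRch (fun p c => c ∈ C.getD p []) (q.map Prod.fst) x)) := by
  induction fuel generalizing q v res with
  | zero => omega
  | succ fuel ih =>
      rcases q with _ | ⟨⟨cur, hop⟩, rest⟩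
      · refine ⟨hresN, fun x => ?_⟩
        show x ∈ res ↔ x ∈ res ∨ (x ∉ S ∧ pvRch _ (List.map Prod.fst []) x)
        simp only [List.map_nil]
        constructor
        · exact Or.inl
        · rintro (h | ⟨_, h⟩)
          · exact h
          · exact absurd h (fun hh => pvRch_nil hh)
      · -- one BFS step
        have hcurq : cur ∈ (((cur, hop) :: rest).map Prod.fst) := by simp
        have hcurv : cur ∈ v := (hv cur).mpr (Or.inr (Or.inr hcurq))
        have hkids : (C.getD cur []).Nodup := hkN cur
        set kids := C.getD cur [] with hkidsdef
        set new := kids.filter (fun c => !(PySem.Set.contains v c)) with hnewdef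
        have hnewN : new.Nodup := hkids.filter _
        have hnewv : ∀ x, x ∈ new → x ∉ v := by
          intro x hx
          have := (List.mem_filter.mp hx).2
          intro hm
          rw [(PySem.Set.contains_iff v x).mpr hm] at this
          simp at this
        have hnewk : ∀ x, x ∈ new → x ∈ kids := fun x hx => List.mem_of_mem_filter hx
        have hrestv : ∀ x, x ∈ rest.map Prod.fst → x ∈ v := by
          intro x hx
          exact (hv x).mpr (Or.inr (Or.inr (by simp [hx])))
        have hresv : ∀ x, x ∈ res → x ∈ v := fun x hx => (hv x).mpr (Or.inr (Or.inl hx))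
        have hcond : ¬ ((0 : Int) > 0 ∧ hop + 1 > 0) := by
          intro h
          exact absurd h.1 (by omega)
        have hstep : pvBFS_A C S 0 (fuel + 1) ((cur, hop) :: rest) v res
            = pvBFS_A C S 0 fuel (rest ++ new.map (fun c => (c, hop + 1))) (v ++ new)
                (if ¬ (PySem.Set.contains S cur) then res ++ [cur] else res) := by
          show (let results := if ¬ (PySem.Set.contains S cur) then res ++ [cur] else res
                let next_hop := hop + 1
                if (0 : Int) > 0 ∧ next_hop > (0 : Int) then
                  pvBFS_A C S 0 fuel rest v results
                else
                  let qv := (C.getD cur []).foldl (pvChildStepA next_hop) (rest, v)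
                  pvBFS_A C S 0 fuel qv.1 qv.2 results) = _
          simp only
          rw [if_neg hcond, pv_childfold kids hkids (hop + 1) rest v]
        rw [hstep]
        set res2 := if ¬ (PySem.Set.contains S cur) then res ++ [cur] else res with hres2
        have hq'fst : ((rest ++ new.map (fun c => (c, hop + 1))).map Prod.fst)
            = rest.map Prod.fst ++ new := by
          simp [List.map_map, Function.comp_def]
        have hcurS : cur ∈ S ↔ ¬ ¬ (PySem.Set.contains S cur) := by
          constructor
          · intro h hh
            exact hh ((PySem.Set.contains_iff S cur).mpr h)
          · intro h
            exact (PySem.Set.contains_iff S cur).mp (not_not.mp h)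
        have hres2mem : ∀ x, x ∈ res2 ↔ x ∈ res ∨ (x = cur ∧ cur ∉ S) := by
          intro x
          rw [hres2]
          by_cases h : PySem.Set.contains S cur = true
          · have hcs : cur ∈ S := (PySem.Set.contains_iff S cur).mp h
            rw [if_neg (not_not.mpr h)]
            constructor
            · exact Or.inl
            · rintro (hh | ⟨rfl, hh⟩)
              · exact hh
              · exact absurd hcs hh
          · have hcs : cur ∉ S := fun hm => h ((PySem.Set.contains_iff S cur).mpr hm)
            rw [if_pos h]
            simp only [List.mem_append, List.mem_singleton]
            constructor
            · rintro (hh | hh)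
              · exact Or.inl hh
              · exact Or.inr ⟨hh, hcs⟩
            · rintro (hh | ⟨rfl, _⟩)
              · exact Or.inl hh
              · exact Or.inr rfl
        have hcurrest : cur ∉ rest.map Prod.fst := by
          have := hqN
          simp only [List.map_cons] at this
          exact (List.nodup_cons.mp this).1
        have hcurnew : cur ∉ new := fun hm => hnewv cur hm hcurv
        have hcurres : cur ∉ res := fun hm => hrQ cur hm hcurq
        -- invariants for the recursive call
        have hfuel2 : (rest ++ new.map (fun c => (c, hop + 1))).length
            + (C.values.flatten.countP (fun c => !(PySem.Set.contains (v ++ new) c))) + 1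
            ≤ fuel := by
          have hdrop := pv_countP_drop C.values.flatten v (v ++ new)
            (fun x hx => List.mem_append_left _ hx) new hnewN
            (by
              intro x hx
              exact ⟨pv_getD_flatten C cur x (hnewk x hx), hnewv x hx,
                List.mem_append_right _ hx⟩)
          simp only [List.length_append, List.length_map, List.length_cons] at hfuel ⊢
          omega
        have hv2 : ∀ x, x ∈ v ++ new ↔ x ∈ S ∨ x ∈ res2
            ∨ x ∈ (rest ++ new.map (fun c => (c, hop + 1))).map Prod.fst := by
          intro x
          rw [hq'fst]
          simp only [List.mem_append]
          rw [hres2mem x]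
          constructor
          · rintro (hx | hx)
            · rcases (hv x).mp hx with h | h | h
              · exact Or.inl h
              · exact Or.inr (Or.inl (Or.inl h))
              · simp only [List.map_cons, List.mem_cons] at h
                rcases h with rfl | h
                · by_cases hs : x ∈ S
                  · exact Or.inl hs
                  · exact Or.inr (Or.inl (Or.inr ⟨rfl, hs⟩))
                · exact Or.inr (Or.inr (Or.inl h))
            · exact Or.inr (Or.inr (Or.inr hx))
          · rintro (hx | hx | hx)
            · exact Or.inl ((hv x).mpr (Or.inl hx))
            · rcases hx with hx | ⟨rfl, _⟩
              · exact Or.inl ((hv x).mpr (Or.inr (Or.inl hx)))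
              · exact Or.inl hcurv
            · rcases hx with hx | hx
              · exact Or.inl ((hv x).mpr (Or.inr (Or.inr (by simp [hx]))))
              · exact Or.inr hx
        have hvN2 : (v ++ new).Nodup := by
          refine List.Nodup.append hvN hnewN ?_
          intro x hx hx2
          exact hnewv x hx2 hx
        have hresN2 : res2.Nodup := by
          rw [hres2]
          by_cases h : PySem.Set.contains S cur = true
          · rw [if_neg (not_not.mpr h)]
            exact hresN
          · rw [if_pos h]
            exact List.Nodup.append hresN (List.nodup_singleton cur)
              (by
                intro x hx hx2
                rcases List.mem_singleton.mp hx2 with rfl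
                exact hcurres hx)
        have hqN2 : ((rest ++ new.map (fun c => (c, hop + 1))).map Prod.fst).Nodup := by
          rw [hq'fst]
          refine List.Nodup.append ?_ hnewN ?_
          · have := hqN
            simp only [List.map_cons] at this
            exact (List.nodup_cons.mp this).2
          · intro x hx hx2
            exact hnewv x hx2 (hrestv x hx)
        have hrS2 : ∀ x, x ∈ res2 → x ∉ S := by
          intro x hx
          rcases (hres2mem x).mp hx with h | ⟨rfl, h⟩
          · exact hrS x h
          · exact h
        have hrQ2 : ∀ x, x ∈ res2
            → x ∉ (rest ++ new.map (fun c => (c, hop + 1))).map Prod.fst := by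
          intro x hx
          rw [hq'fst]
          intro hm
          rcases (hres2mem x).mp hx with h | ⟨rfl, _⟩
          · rcases List.mem_append.mp hm with hm | hm
            · exact hrQ x h (by simp [hm])
            · exact hnewv x hm (hresv x h)
          · rcases List.mem_append.mp hm with hm | hm
            · exact hcurrest hm
            · exact hcurnew hm
        have hclosed2 : ∀ x, x ∈ v ++ new
            → x ∉ (rest ++ new.map (fun c => (c, hop + 1))).map Prod.fst
            → ∀ c, c ∈ C.getD x [] → c ∈ v ++ new := by
          intro x hx hxq c hc
          rw [hq'fst] at hxq
          simp only [List.mem_append] at hx hxq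
          rw [not_or] at hxq
          rcases hx with hx | hx
          · by_cases hxc : x = cur
            · subst hxc
              by_cases hcv : c ∈ v
              · exact List.mem_append_left _ hcv
              · refine List.mem_append_right _ ?_
                rw [hnewdef, List.mem_filter]
                refine ⟨hc, ?_⟩
                have : PySem.Set.contains v c = false := by
                  rcases hcb : PySem.Set.contains v c with _ | _
                  · rfl
                  · exact absurd ((PySem.Set.contains_iff v c).mp hcb) hcv
                simp [this, hcv]
            · have hxq0 : x ∉ (((cur, hop) :: rest).map Prod.fst) := by
                simp only [List.map_cons, List.mem_cons]
                rintro (h | h)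
                · exact hxc h
                · exact hxq.1 h
              exact List.mem_append_left _ (hclosed x hx hxq0 c hc)
          · exact absurd hx hxq.2
        rcases ih (rest ++ new.map (fun c => (c, hop + 1))) (v ++ new) res2
          hfuel2 hv2 hvN2 hresN2 hqN2 hrS2 hrQ2 hclosed2 with ⟨hfinN, hfin⟩
        refine ⟨hfinN, fun x => ?_⟩
        rw [hfin x, hq'fst, hres2mem x]
        simp only [List.map_cons]
        constructor
        · rintro (⟨hx | ⟨rfl, hs⟩⟩ | ⟨hs, hr⟩)
          · exact Or.inl hx
          · exact Or.inr ⟨hs, pvRch.base x List.mem_cons_self⟩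
          · exact Or.inr ⟨hs, pv_rch_back C v cur (rest.map Prod.fst) x hr⟩
        · rintro (hx | ⟨hs, hr⟩)
          · exact Or.inl (Or.inl hx)
          · rcases pv_rch_fwd C v cur (rest.map Prod.fst)
              (by
                intro y hy hyq c hc
                exact hclosed y hy (by simpa using hyq) c hc) x hr
              with hx | hx | ⟨hxv, hxr, hxn⟩
            · exact Or.inl (Or.inr ⟨hx, hx ▸ hs⟩)
            · exact Or.inr ⟨hs, hx⟩
            · rcases (hv x).mp hxv with h | h | h
              · exact absurd h hs
              · exact Or.inl (Or.inl h)
              · simp only [List.map_cons, List.mem_cons] at h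
                rcases h with rfl | h
                · exact Or.inl (Or.inr ⟨rfl, hs⟩)
                · exact absurd h hxr

-- ---- B's relaxation pass and saturation loop ----

theorem pvRelax_pos (cl : PySem.Set String) (b : Bool) (e : String × String)
    (h1 : e.1 ∈ cl) (h2 : e.2 ∉ cl) :
    pvRelax (cl, b) e = (PySem.Set.add cl e.2, true) := by
  have c1 : PySem.Set.contains cl e.1 = true := (PySem.Set.contains_iff _ _).mpr h1
  have c2 : ¬ (PySem.Set.contains cl e.2 = true) :=
    fun hc => h2 ((PySem.Set.contains_iff _ _).mp hc)
  simp only [pvRelax]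
  rw [if_pos ⟨c1, c2⟩]

theorem pvRelax_neg (cl : PySem.Set String) (b : Bool) (e : String × String)
    (h : ¬ (e.1 ∈ cl ∧ e.2 ∉ cl)) : pvRelax (cl, b) e = (cl, b) := by
  simp only [pvRelax]
  rw [if_neg]
  intro hc
  exact h ⟨(PySem.Set.contains_iff _ _).mp hc.1,
    fun hm => hc.2 ((PySem.Set.contains_iff _ _).mpr hm)⟩

theorem pv_relax_flag_true (l : List (String × String)) (s : PySem.Set String) :
    (l.foldl pvRelax (s, true)).2 = true := by
  induction l generalizing s with
  | nil => rfl
  | cons e l ih =>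
      simp only [List.foldl_cons]
      unfold pvRelax
      split_ifs with h
      · exact ih _
      · exact ih _

theorem pv_relax_fold_mono (l : List (String × String)) (s : PySem.Set String × Bool) :
    (∀ x, x ∈ s.1 → x ∈ (l.foldl pvRelax s).1) ∧
    (∀ x, x ∈ (l.foldl pvRelax s).1 → x ∈ s.1 ∨ x ∈ l.map Prod.snd) ∧
    (s.1.Nodup → (l.foldl pvRelax s).1.Nodup) := by
  induction l generalizing s with
  | nil => exact ⟨fun x hx => hx, fun x hx => Or.inl hx, fun h => h⟩
  | cons e l ih =>
      simp only [List.foldl_cons, List.map_cons]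
      rcases ih (pvRelax s e) with ⟨ih1, ih2, ih3⟩
      have hstep1 : ∀ x, x ∈ s.1 → x ∈ (pvRelax s e).1 := by
        intro x hx
        unfold pvRelax
        split_ifs with h
        · simp [PySem.Set.mem_add, hx]
        · exact hx
      have hstep2 : ∀ x, x ∈ (pvRelax s e).1 → x ∈ s.1 ∨ x = e.2 := by
        intro x hx
        unfold pvRelax at hx
        split_ifs at hx with h
        · simpa [PySem.Set.mem_add] using hx
        · exact Or.inl hx
      refine ⟨fun x hx => ih1 x (hstep1 x hx), ?_, ?_⟩
      · intro x hx
        rcases ih2 x hx with h | h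
        · rcases hstep2 x h with hin | hin
          · exact Or.inl hin
          · exact Or.inr (by simp [hin])
        · exact Or.inr (by simp [h])
      · intro hN
        apply ih3
        unfold pvRelax
        split_ifs with h
        · exact PySem.Set.nodup_add _ _ hN
        · exact hN

theorem pv_relax_fold_false (l : List (String × String)) (cl : PySem.Set String)
    (hf : (l.foldl pvRelax (cl, false)).2 = false) :
    (l.foldl pvRelax (cl, false)).1 = cl ∧ ∀ e, e ∈ l → e.1 ∈ cl → e.2 ∈ cl := by
  induction l generalizing cl with
  | nil => exact ⟨rfl, by simp⟩
  | cons e l ih =>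
      simp only [List.foldl_cons] at hf ⊢
      by_cases h : e.1 ∈ cl ∧ e.2 ∉ cl
      · exfalso
        rw [pvRelax_pos cl false e h.1 h.2, pv_relax_flag_true] at hf
        simp at hf
      · rw [pvRelax_neg cl false e h] at hf ⊢
        rcases ih cl hf with ⟨h1, h2⟩
        refine ⟨h1, ?_⟩
        intro ed hed hin
        rcases List.mem_cons.mp hed with hed2 | hed2
        · subst hed2
          by_contra hc
          exact h ⟨hin, hc⟩
        · exact h2 ed hed2 hin

theorem pv_relax_fold_true (l : List (String × String)) (cl : PySem.Set String)
    (hf : (l.foldl pvRelax (cl, false)).2 = true) :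
    ∃ c, c ∈ l.map Prod.snd ∧ c ∉ cl ∧ c ∈ (l.foldl pvRelax (cl, false)).1 := by
  induction l generalizing cl with
  | nil => simp at hf
  | cons e l ih =>
      simp only [List.foldl_cons] at hf ⊢
      by_cases h : e.1 ∈ cl ∧ e.2 ∉ cl
      · rw [pvRelax_pos cl false e h.1 h.2] at hf ⊢
        refine ⟨e.2, by simp, h.2, ?_⟩
        have hmono := (pv_relax_fold_mono l (PySem.Set.add cl e.2, true)).1
        exact hmono e.2 (by simp [PySem.Set.mem_add])
      · rw [pvRelax_neg cl false e h] at hf ⊢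
        rcases ih cl hf with ⟨c, hc1, hc2, hc3⟩
        exact ⟨c, by simp [hc1], hc2, hc3⟩

theorem pv_relax_fold_sound {E : String → String → Prop} {R : List String}
    (l : List (String × String)) (hl : ∀ e, e ∈ l → E e.1 e.2)
    (s : PySem.Set String × Bool) (hs : ∀ x, x ∈ s.1 → pvRch E R x) :
    ∀ x, x ∈ (l.foldl pvRelax s).1 → pvRch E R x := by
  induction l generalizing s with
  | nil => exact hs
  | cons e l ih =>
      simp only [List.foldl_cons]
      apply ih (fun ed hed => hl ed (List.mem_cons_of_mem _ hed))
      intro x hx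
      unfold pvRelax at hx
      split_ifs at hx with h
      · rcases (PySem.Set.mem_add _ _ _).mp hx with hin | hin
        · exact hs x hin
        · subst hin
          have hp : pvRch E R e.1 :=
            hs e.1 ((PySem.Set.contains_iff _ _).mp h.1)
          exact pvRch.step e.1 e.2 hp (hl e List.mem_cons_self)
      · exact hs x hx

theorem pv_saturate_spec (edges : List (String × String)) (R : List String)
    (fuel : Nat) (cl : PySem.Set String)
    (hfuel : (edges.map Prod.snd).countP (fun c => !(PySem.Set.contains cl c)) + 1 ≤ fuel)
    (hN : cl.Nodup)
    (hsound : ∀ x, x ∈ cl → pvRch (fun p c => (p, c) ∈ edges) R x)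
    (hR : ∀ x, x ∈ R → x ∈ cl) :
    (pvSaturate edges fuel cl).Nodup ∧
    ∀ x, x ∈ pvSaturate edges fuel cl ↔ pvRch (fun p c => (p, c) ∈ edges) R x := by
  induction fuel generalizing cl with
  | zero => omega
  | succ fuel ih =>
      have hunf : pvSaturate edges (fuel + 1) cl
          = (if (edges.foldl pvRelax (cl, false)).2 then
              pvSaturate edges fuel (edges.foldl pvRelax (cl, false)).1
            else (edges.foldl pvRelax (cl, false)).1) := rfl
      rw [hunf]
      rcases hf : (edges.foldl pvRelax (cl, false)).2 with _ | _
      · simp only [Bool.false_eq_true, if_false]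
        rcases pv_relax_fold_false edges cl hf with ⟨heq, hcl⟩
        rw [heq]
        refine ⟨hN, fun x => ⟨hsound x, ?_⟩⟩
        intro hx
        induction hx with
        | base y hy => exact hR y hy
        | step p c hp he ihp => exact hcl (p, c) he ihp
      · simp only [if_true]
        rcases pv_relax_fold_true edges cl hf with ⟨c, hc1, hc2, hc3⟩
        rcases pv_relax_fold_mono edges (cl, false) with ⟨hm1, hm2, hm3⟩
        have hdrop := pv_countP_drop (edges.map Prod.snd) cl
          ((edges.foldl pvRelax (cl, false)).1) hm1 [c]
          (List.nodup_singleton c)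
          (by
            intro x hx
            rcases List.mem_singleton.mp hx with rfl
            exact ⟨hc1, hc2, hc3⟩)
        simp only [List.length_singleton] at hdrop
        apply ih
        · omega
        · exact hm3 hN
        · exact pv_relax_fold_sound edges (fun e he => by simpa using he) (cl, false) hsound
        · intro x hx
          exact hm1 x (hR x hx)

-- ---- per-root and whole-function equality ----

theorem pv_perroot (topology : List (String × List (String × String)))
    (hnd : (topology.map Prod.fst).Nodup) (rid : String) (cr : Bool) :
    (pvGetDownstream topology rid 0 cr (pvBuildChildrenMap topology)).Nodup ∧
    (PySem.Set.diff
      (pvSaturate (pvEdgesIndexB topology).1 (topology.length + 1)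
        (PySem.Set.ofList (PySem.Set.ofList (pvStartsB topology (pvEdgesIndexB topology).2 rid cr))))
      (PySem.Set.ofList (pvStartsB topology (pvEdgesIndexB topology).2 rid cr))).Nodup ∧
    ∀ x, x ∈ pvGetDownstream topology rid 0 cr (pvBuildChildrenMap topology) ↔
      x ∈ PySem.Set.diff
        (pvSaturate (pvEdgesIndexB topology).1 (topology.length + 1)
          (PySem.Set.ofList (PySem.Set.ofList (pvStartsB topology (pvEdgesIndexB topology).2 rid cr))))
        (PySem.Set.ofList (pvStartsB topology (pvEdgesIndexB topology).2 rid cr)) := by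
  set SE := PySem.Set.ofList (pvStartsB topology (pvEdgesIndexB topology).2 rid cr) with hSE
  have hSN : SE.Nodup := by rw [hSE]; exact PySem.Set.nodup_ofList _
  have hSS : PySem.Set.ofList SE = SE := PySem.Set.ofList_eq_self_of_nodup _ hSN
  have hresA : (pvGetDownstream topology rid 0 cr (pvBuildChildrenMap topology)).Nodup ∧
      ∀ x, x ∈ pvGetDownstream topology rid 0 cr (pvBuildChildrenMap topology) ↔
        (x ∉ SE ∧ pvRch (fun p c => c ∈ (pvBuildChildrenMap topology).getD p []) SE x) := by
    unfold pvGetDownstream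
    dsimp only
    rw [pv_starts topology hnd rid cr, ← hSE, hSS]
    have hbfs := pv_bfs_spec (pvBuildChildrenMap topology) SE
      (pv_kids_nodup topology hnd)
      ((SE.map (fun sid => (sid, (0 : Int)))).length
        + (((pvBuildChildrenMap topology).values.map List.length).sum) + 1)
      (SE.map (fun sid => (sid, (0 : Int)))) SE []
      (by
        have h1 : ((pvBuildChildrenMap topology).values.flatten.countP
            (fun c => !(PySem.Set.contains SE c)))
            ≤ (pvBuildChildrenMap topology).values.flatten.length :=
          List.countP_le_length
        have h2 : (pvBuildChildrenMap topology).values.flatten.length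
            = (((pvBuildChildrenMap topology).values.map List.length).sum) :=
          List.length_flatten
        omega)
      (by
        intro x
        simp only [List.map_map, Function.comp_def, List.map_id', List.not_mem_nil,
          false_or]
        constructor
        · intro h
          exact Or.inr (by simpa using h)
        · rintro (h | h)
          · exact h
          · simpa using h)
      hSN List.nodup_nil
      (by simpa [List.map_map, Function.comp_def] using hSN)
      (by intro x hx; simp at hx)
      (by intro x hx; simp at hx)
      (by
        intro x hx hxq
        exfalso
        apply hxq
        simpa [List.map_map, Function.comp_def] using hx)
    rcases hbfs with ⟨h1, h2⟩
    refine ⟨h1, fun x => ?_⟩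
    rw [h2 x]
    simp only [List.not_mem_nil, false_or]
    constructor
    · rintro ⟨hs, hr⟩
      refine ⟨hs, ?_⟩
      apply pvRch_mono (R := (SE.map (fun sid => (sid, (0 : Int)))).map Prod.fst)
      · intro y hy
        simpa [List.map_map, Function.comp_def] using hy
      · exact hr
    · rintro ⟨hs, hr⟩
      refine ⟨hs, ?_⟩
      apply pvRch_mono (R := SE)
      · intro y hy
        simpa [List.map_map, Function.comp_def] using hy
      · exact hr
  have hsat := pv_saturate_spec (pvEdgesIndexB topology).1 SE (topology.length + 1)
    (PySem.Set.ofList SE)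
    (by
      rw [hSS]
      have h1 : (((pvEdgesIndexB topology).1.map Prod.snd).countP
          (fun c => !(PySem.Set.contains SE c)))
          ≤ ((pvEdgesIndexB topology).1.map Prod.snd).length := List.countP_le_length
      have h2 : ((pvEdgesIndexB topology).1.map Prod.snd).length
          = (pvEdgesIndexB topology).1.length := List.length_map ..
      have h3 : (pvEdgesIndexB topology).1.length ≤ topology.length := by
        rw [pv_edgesB]
        exact List.length_filterMap_le _ _
      omega)
    (by rw [hSS]; exact hSN)
    (by
      rw [hSS]
      intro x hx
      exact pvRch.base x hx)
    (by rw [hSS]; intro x hx; exact hx)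
  rcases hsat with ⟨hsatN, hsatmem⟩
  refine ⟨hresA.1, PySem.Set.nodup_diff _ _ hsatN, fun x => ?_⟩
  rw [hresA.2 x, PySem.Set.mem_diff, hsatmem x]
  constructor
  · rintro ⟨hs, hr⟩
    refine ⟨?_, hs⟩
    apply pvRch_congr (E := fun p c => c ∈ (pvBuildChildrenMap topology).getD p [])
    · intro p c
      rw [pv_memC, pv_memE]
    · exact hr
  · rintro ⟨hr, hs⟩
    refine ⟨hs, ?_⟩
    apply pvRch_congr (E := fun p c => (p, c) ∈ (pvEdgesIndexB topology).1)
    · intro p c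
      rw [pv_memC, pv_memE]
    · exact hr

theorem pv_fold_acc (topology : List (String × List (String × String)))
    (hnd : (topology.map Prod.fst).Nodup) (cr : Bool) (rids : List String)
    (accA accB : PySem.Set String) (hA : accA.Nodup) (hB : accB.Nodup)
    (hmem : ∀ x, x ∈ accA ↔ x ∈ accB) :
    let FA := rids.foldl (fun all rid =>
      PySem.Set.update all (pvGetDownstream topology rid 0 cr (pvBuildChildrenMap topology))) accA
    let FB := rids.foldl (fun all rid =>
      let starts : PySem.Set String :=
        PySem.Set.ofList (pvStartsB topology (pvEdgesIndexB topology).2 rid cr)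
      let closure := pvSaturate (pvEdgesIndexB topology).1 (topology.length + 1)
        (PySem.Set.ofList starts)
      PySem.Set.update all (PySem.Set.diff closure starts)) accB
    FA.Nodup ∧ FB.Nodup ∧ ∀ x, x ∈ FA ↔ x ∈ FB := by
  induction rids generalizing accA accB with
  | nil => exact ⟨hA, hB, hmem⟩
  | cons rid rids ih =>
      simp only [List.foldl_cons]
      rcases pv_perroot topology hnd rid cr with ⟨hrAN, hrBN, hrmem⟩
      apply ih
      · exact PySem.Set.nodup_update _ _ hA
      · exact PySem.Set.nodup_update _ _ hB
      · intro x
        rw [PySem.Set.mem_update, PySem.Set.mem_update, hmem x, hrmem x]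

-- ===== VERDICT (by name: the statement is the Claim_ definition above) =====
theorem get_all_downstream_spec : Claim_equal_get_all_downstream := by
  intro topology root_ids cr _hdom hnd
  unfold Spec_get_all_downstream get_all_downstream get_all_downstream_alt
  dsimp only
  rcases pv_fold_acc topology hnd cr root_ids PySem.Set.empty PySem.Set.empty
    List.nodup_nil List.nodup_nil (fun x => Iff.rfl) with ⟨hAN, hBN, hmem⟩
  apply PySem.List.sorted_eq_sorted_of_perm
  · intro a b h
    exact h
  · exact (List.perm_ext_iff_of_nodup hAN hBN).mpr hmem
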